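-- pv_equiv track=rewrite | github.com/bjgilger/Portfolio | dominoes/dominoes.py | get_computer_move
-- ===== SOURCE A (Python) =====
-- def can_play(piece, end_value):
--     return end_value in piece
--
-- def orient_piece(piece, end_value, place_left):
--     if place_left:
--         return piece if piece[1] == end_value else piece[::-1]
--     else:  # place_right
--         return piece if piece[0] == end_value else piece[::-1]
--
-- def count_numbers(pieces, snake):
--     counts = {i: 0 for i in range(7)}
--     for piece in pieces + snake:
--         counts[piece[0]] += 1
--         counts[piece[1]] += 1
--     return counts
--
-- def score_piece(piece, counts):
--     return counts[piece[0]] + counts[piece[1]]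
--
-- def get_computer_move(computer_pieces, domino_snake):
--     left_end = domino_snake[0][0]
--     right_end = domino_snake[-1][1]
--     counts = count_numbers(computer_pieces, domino_snake)
--
--     possible_moves = []
--     for index, piece in enumerate(computer_pieces):
--         score = score_piece(piece, counts)
--         # Check if playable on the right side
--         if can_play(piece, right_end):
--             move = (index + 1, "right", orient_piece(piece, right_end, False), score)
--             possible_moves.append(move)
--         # Check if playable on the left side
--         if can_play(piece, left_end):
--             move = (-1 * (index + 1), "left", orient_piece(piece, left_end, True), score)
--             possible_moves.append(move)
--
--     if not possible_moves:
--         return 0, "draw", None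
--
--     # Sort all possible moves by their score, descending
--     possible_moves.sort(key=lambda x: x[3], reverse=True)
--
--     # Return the details of the best move
--     best_move = possible_moves[0]
--     return best_move[0], best_move[1], best_move[2]
-- ===== SOURCE B (Python) =====
-- def get_computer_move(computer_pieces, domino_snake):
--     left_end = domino_snake[0][0]
--     right_end = domino_snake[-1][1]
--     values = [v for piece in computer_pieces + domino_snake for v in piece]
--     counts = [0] * 7          # one counter per pip value 0..6
--     for v in values:
--         counts[v] += 1
--     best = None               # (score, (signed index, side, oriented piece))
--     for i, (a, b) in enumerate(computer_pieces):
--         if a == right_end or b == right_end: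
--             cand = (i + 1, "right", (a, b) if a == right_end else (b, a))
--         elif a == left_end or b == left_end:
--             cand = (-(i + 1), "left", (a, b) if b == left_end else (b, a))
--         else:
--             continue
--         score = counts[a] + counts[b]
--         if best is None or score > best[0]:
--             best = (score, cand)
--     return (0, "draw", None) if best is None else best[1]
-- ===== Notes on version B (the rewrite author's own statement) =====
-- stated objective: simpler
-- what changed: Drops the possible_moves list and the stable descending sort in favour of a single pass keeping one running best (replaced only on strictly greater score, with right checked before left per piece via elif, which preserves A's tie-breaking), and replaces the pre-seeded 0..6 dict with a plain occurrence counter.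
import Mathlib
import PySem

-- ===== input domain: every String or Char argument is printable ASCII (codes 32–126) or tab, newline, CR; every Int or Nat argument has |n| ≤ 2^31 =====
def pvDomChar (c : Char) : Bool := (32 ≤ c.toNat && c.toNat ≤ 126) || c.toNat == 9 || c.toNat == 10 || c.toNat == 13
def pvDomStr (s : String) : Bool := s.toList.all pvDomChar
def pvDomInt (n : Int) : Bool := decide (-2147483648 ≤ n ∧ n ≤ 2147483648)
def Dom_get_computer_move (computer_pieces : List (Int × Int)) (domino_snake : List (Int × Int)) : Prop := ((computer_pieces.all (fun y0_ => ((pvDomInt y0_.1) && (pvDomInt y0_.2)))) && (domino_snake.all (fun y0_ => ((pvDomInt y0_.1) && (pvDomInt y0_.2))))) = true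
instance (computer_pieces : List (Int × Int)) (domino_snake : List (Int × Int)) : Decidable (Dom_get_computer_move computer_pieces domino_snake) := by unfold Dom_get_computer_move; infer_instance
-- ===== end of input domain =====

-- B replaces A's possible_moves list + stable descending sort by a single running-best pass
-- (strict > keeps the first maximum, right before left per piece) and A's pre-seeded 0..6
-- dict by a plain occurrence counter; objective: simpler.


-- ===== PORT A =====
def can_play (piece : Int × Int) (end_value : Int) : Bool :=
  piece.1 == end_value || piece.2 == end_value   -- 'end_value in piece' on a pair

def orient_piece (piece : Int × Int) (end_value : Int) (place_left : Bool) : Int × Int :=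
  if place_left then (if piece.2 == end_value then piece else (piece.2, piece.1))
  else (if piece.1 == end_value then piece else (piece.2, piece.1))

-- count_numbers: 'counts[piece[0]] += 1' raises KeyError when the key is absent; none = that KeyError
def count_numbers (pieces snake : List (Int × Int)) : Option (PySem.Dict Int Int) :=
  let counts : PySem.Dict Int Int :=
    (PySem.List.pyRange 0 7 1).foldl (fun d i => d.insert i 0) PySem.Dict.empty
  (pieces ++ snake).foldl
    (fun od p => od.bind fun d =>
      (d.get? p.1).bind fun v =>
        let d := d.insert p.1 (v + 1)
        (d.get? p.2).bind fun w => some (d.insert p.2 (w + 1)))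
    (some counts)

-- score_piece's KeyError cannot occur once count_numbers returned (every accessed value is then a key),
-- so getD 0 is exact there
def score_piece (piece : Int × Int) (counts : PySem.Dict Int Int) : Int :=
  counts.getD piece.1 0 + counts.getD piece.2 0

def get_computer_move (computer_pieces : List (Int × Int)) (domino_snake : List (Int × Int)) : Int × String × (Option (Int × Int)) :=
  match PySem.List.pyGet? domino_snake 0, PySem.List.pyGet? domino_snake (-1), count_numbers computer_pieces domino_snake with
  | some fst_, some lst, some counts =>
    let left_end := fst_.1
    let right_end := lst.2
    let possible_moves : List (Int × String × (Int × Int) × Int) :=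
      (PySem.List.enumerate computer_pieces).foldl
        (fun acc ip =>
          let score := score_piece ip.2 counts
          let acc := if can_play ip.2 right_end then
              acc ++ [(ip.1 + 1, "right", orient_piece ip.2 right_end false, score)] else acc
          if can_play ip.2 left_end then
              acc ++ [(-1 * (ip.1 + 1), "left", orient_piece ip.2 left_end true, score)] else acc)
        []
    if possible_moves.isEmpty then (0, "draw", none)
    else
      match PySem.List.sorted possible_moves (fun m => m.2.2.2) true with
      | [] => (0, "draw", none)   -- unreachable: sorted of a nonempty list is nonempty
      | best :: _ => (best.1, best.2.1, some best.2.2.1)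
  | _, _, _ => (0, "draw", none)  -- IndexError / KeyError: excluded by Pre_

-- ===== PORT B =====
def get_computer_move_alt (computer_pieces : List (Int × Int)) (domino_snake : List (Int × Int)) : Int × String × (Option (Int × Int)) :=
  -- Source B's None-checks are written with Option.elim (none-branch first)
  (PySem.List.pyGet? domino_snake 0).elim (0, "draw", none) fun fst_ =>   -- IndexError on an empty snake: excluded by Pre_
  (PySem.List.pyGet? domino_snake (-1)).elim (0, "draw", none) fun lst =>
    let left_end := fst_.1
    let right_end := lst.2
    let values := (computer_pieces ++ domino_snake).flatMap (fun p => [p.1, p.2])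
    -- counts[v] += 1 on the 7-slot list: pyGet?/pySet? return none exactly where Python raises IndexError
    let counts? := values.foldl
      (fun oc v => oc.bind fun c =>
        (PySem.List.pyGet? c v).bind fun x => PySem.List.pySet? c v (x + 1))
      (some (List.replicate 7 (0 : Int)))
    counts?.elim (0, "draw", none) fun counts =>
      let best :=
        (PySem.List.enumerate computer_pieces).foldl
          (fun best ip =>
            let p := ip.2
            let cand? : Option (Int × String × (Int × Int)) :=
              if p.1 == right_end || p.2 == right_end then
                some (ip.1 + 1, "right", if p.1 == right_end then p else (p.2, p.1))
              else if p.1 == left_end || p.2 == left_end then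
                some (-(ip.1 + 1), "left", if p.2 == left_end then p else (p.2, p.1))
              else none
            cand?.elim best fun cand =>
              -- counts[a]+counts[b]: both indices were written by the counting loop, so pyGetD 0 is exact
              let score := PySem.List.pyGetD counts p.1 0 + PySem.List.pyGetD counts p.2 0
              best.elim (some (score, cand)) fun b =>
                if score > b.1 then some (score, cand) else best)
          none
      best.elim (0, "draw", none) fun b => (b.2.1, b.2.2.1, some b.2.2.2)

-- ===== PRECONDITION & SPEC =====
-- A raises IndexError on an empty snake and KeyError on any domino value outside 0..6.
def Pre_get_computer_move (computer_pieces : List (Int × Int)) (domino_snake : List (Int × Int)) : Prop :=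
  domino_snake ≠ [] ∧
  ∀ p ∈ computer_pieces ++ domino_snake, 0 ≤ p.1 ∧ p.1 < 7 ∧ 0 ≤ p.2 ∧ p.2 < 7
instance (computer_pieces : List (Int × Int)) (domino_snake : List (Int × Int)) : Decidable (Pre_get_computer_move computer_pieces domino_snake) := by unfold Pre_get_computer_move; infer_instance

def pvWitness_get_computer_move : (List (Int × Int)) × (List (Int × Int)) := ([(1, 2), (3, 4)], [(2, 3)])

def Spec_get_computer_move (computer_pieces : List (Int × Int)) (domino_snake : List (Int × Int)) (out : Int × String × (Option (Int × Int))) : Prop := out = get_computer_move_alt computer_pieces domino_snake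
instance (computer_pieces : List (Int × Int)) (domino_snake : List (Int × Int)) (out : Int × String × (Option (Int × Int))) : Decidable (Spec_get_computer_move computer_pieces domino_snake out) := by unfold Spec_get_computer_move; infer_instance

-- ===== CLAIM (what is proved, stated in full; the proofs are below) =====
def Claim_equal_get_computer_move : Prop := ∀ (computer_pieces : List (Int × Int)) (domino_snake : List (Int × Int)), Dom_get_computer_move computer_pieces domino_snake → Pre_get_computer_move computer_pieces domino_snake → Spec_get_computer_move computer_pieces domino_snake (get_computer_move computer_pieces domino_snake)



-- ===== LEMMAS AND PROOFS =====

-- B's best entry (score, (idx, side, piece)) viewed as A's move tuple (idx, side, piece, score)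
def pvToMove (b : Int × (Int × String × (Int × Int))) : Int × String × (Int × Int) × Int :=
  (b.2.1, b.2.2.1, b.2.2.2, b.1)

-- running "first strict maximum by score" over A's move tuples
def pvStep (ob : Option (Int × String × (Int × Int) × Int)) (x : Int × String × (Int × Int) × Int) :
    Option (Int × String × (Int × Int) × Int) :=
  match ob with
  | none => some x
  | some m => if m.2.2.2 < x.2.2.2 then some x else some m

-- the moves A's loop appends for one enumerated piece, score abstracted to s
def pvSubA (le ri : Int) (s : Int × Int → Int) (ip : Int × (Int × Int)) :
    List (Int × String × (Int × Int) × Int) :=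
  (if can_play ip.2 ri then [(ip.1 + 1, "right", orient_piece ip.2 ri false, s ip.2)] else []) ++
  (if can_play ip.2 le then [(-1 * (ip.1 + 1), "left", orient_piece ip.2 le true, s ip.2)] else [])

-- B's loop body, score abstracted to s
def pvStepB (le ri : Int) (s : Int × Int → Int)
    (best : Option (Int × (Int × String × (Int × Int)))) (ip : Int × (Int × Int)) :
    Option (Int × (Int × String × (Int × Int))) :=
  let p := ip.2
  let cand? : Option (Int × String × (Int × Int)) :=
    if p.1 == ri || p.2 == ri then
      some (ip.1 + 1, "right", if p.1 == ri then p else (p.2, p.1))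
    else if p.1 == le || p.2 == le then
      some (-(ip.1 + 1), "left", if p.2 == le then p else (p.2, p.1))
    else none
  cand?.elim best fun cand =>
    let score := s ip.2
    best.elim (some (score, cand)) fun b =>
      if score > b.1 then some (score, cand) else best

lemma pvLoopA (le ri : Int) (counts : PySem.Dict Int Int) :
    ∀ (l : List (Int × (Int × Int))) (acc : List (Int × String × (Int × Int) × Int)),
    l.foldl (fun acc ip =>
        let score := score_piece ip.2 counts
        let acc := if can_play ip.2 ri then
            acc ++ [(ip.1 + 1, "right", orient_piece ip.2 ri false, score)] else acc
        if can_play ip.2 le then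
            acc ++ [(-1 * (ip.1 + 1), "left", orient_piece ip.2 le true, score)] else acc) acc
      = acc ++ l.flatMap (pvSubA le ri (fun p => score_piece p counts)) := by
  intro l
  induction l with
  | nil => intro acc; simp
  | cons ip t ih =>
    intro acc
    simp only [List.foldl_cons, List.flatMap_cons, ih]
    simp only [pvSubA]
    split <;> split <;> simp

lemma pvHeadFold : ∀ (xs : List (Int × String × (Int × Int) × Int)) (m : Int × String × (Int × Int) × Int)
    (acc : List (Int × String × (Int × Int) × Int)), acc.head? = some m →
    (xs.foldl (fun acc x =>
        PySem.List.insertBy (fun a b => decide (b.2.2.2 < a.2.2.2)) x acc) acc).head?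
      = xs.foldl pvStep (some m) := by
  intro xs
  induction xs with
  | nil => intro m acc h; simpa using h
  | cons x t ih =>
    intro m acc h
    cases acc with
    | nil => simp at h
    | cons a rest =>
      simp only [List.head?_cons, Option.some.injEq] at h
      subst h
      simp only [List.foldl_cons]
      have hins : PySem.List.insertBy (fun a b => decide (b.2.2.2 < a.2.2.2)) x (a :: rest)
          = if a.2.2.2 < x.2.2.2 then x :: a :: rest
            else a :: PySem.List.insertBy (fun a b => decide (b.2.2.2 < a.2.2.2)) x rest := by
        simp [PySem.List.insertBy]
      by_cases hc : a.2.2.2 < x.2.2.2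
      · rw [hins, if_pos hc, ih x _ (by simp)]
        simp [pvStep, hc]
      · rw [hins, if_neg hc, ih a _ (by simp)]
        simp [pvStep, hc]

lemma pvSortedHead (ms : List (Int × String × (Int × Int) × Int)) :
    (PySem.List.sorted ms (fun m => m.2.2.2) true).head? = ms.foldl pvStep none := by
  rw [PySem.List.sorted_rev_eq_foldl_insertBy]
  cases ms with
  | nil => rfl
  | cons m t =>
    simp only [List.foldl_cons]
    rw [pvHeadFold t m (PySem.List.insertBy (fun a b => decide (b.2.2.2 < a.2.2.2)) m [])
      (by simp [PySem.List.insertBy])]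
    rfl

lemma pvFoldSome : ∀ (t : List (Int × String × (Int × Int) × Int)) (m : Int × String × (Int × Int) × Int),
    (t.foldl pvStep (some m)).isSome := by
  intro t
  induction t with
  | nil => intro m; rfl
  | cons x s ih =>
    intro m
    simp only [List.foldl_cons, pvStep]
    split <;> exact ih _

lemma pvStepAgree (le ri : Int) (s : Int × Int → Int) (ip : Int × (Int × Int))
    (b : Option (Int × (Int × String × (Int × Int)))) :
    (pvSubA le ri s ip).foldl pvStep (b.map pvToMove) = (pvStepB le ri s b ip).map pvToMove := by
  simp only [pvSubA, pvStepB, can_play]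
  by_cases hr : (ip.2.1 == ri || ip.2.2 == ri) = true
  · by_cases hl : (ip.2.1 == le || ip.2.2 == le) = true
    · simp only [hr, hl, if_true]
      cases b with
      | none =>
        simp only [Option.map_none]
        simp [pvStep, pvToMove, orient_piece]
      | some bb =>
        simp only [Option.map_some]
        simp only [pvToMove]
        by_cases hgt : bb.1 < s ip.2
        · simp [pvStep, pvToMove, orient_piece, hgt, gt_iff_lt]
        · simp [pvStep, pvToMove, orient_piece, hgt, gt_iff_lt]
    · simp only [hr, hl, if_true]
      cases b with
      | none => simp [pvStep, pvToMove, orient_piece]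
      | some bb =>
        by_cases hgt : bb.1 < s ip.2 <;>
          simp [pvStep, pvToMove, orient_piece, hgt, gt_iff_lt]
  · by_cases hl : (ip.2.1 == le || ip.2.2 == le) = true
    · simp only [hr, hl, if_true]
      cases b with
      | none => simp [pvStep, pvToMove, orient_piece]
      | some bb =>
        by_cases hgt : bb.1 < s ip.2 <;>
          simp [pvStep, pvToMove, orient_piece, hgt, gt_iff_lt]
    · simp [hr, hl]

lemma pvFoldAgree (le ri : Int) (s : Int × Int → Int) :
    ∀ (l : List (Int × (Int × Int))) (b : Option (Int × (Int × String × (Int × Int)))),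
    (l.flatMap (pvSubA le ri s)).foldl pvStep (b.map pvToMove)
      = (l.foldl (pvStepB le ri s) b).map pvToMove := by
  intro l
  induction l with
  | nil => intro b; rfl
  | cons ip t ih =>
    intro b
    simp only [List.flatMap_cons, List.foldl_cons, List.foldl_append]
    rw [pvStepAgree, ih]

lemma pvCountFold :
    ∀ (tiles : List (Int × Int)) (d : PySem.Dict Int Int),
    (∀ p ∈ tiles, 0 ≤ p.1 ∧ p.1 < 7 ∧ 0 ≤ p.2 ∧ p.2 < 7) →
    (∀ v : Int, 0 ≤ v → v < 7 → d.contains v = true) →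
    ∃ d', tiles.foldl
        (fun od p => od.bind fun d =>
          (d.get? p.1).bind fun v =>
            let d := d.insert p.1 (v + 1)
            (d.get? p.2).bind fun w => some (d.insert p.2 (w + 1)))
        (some d) = some d' ∧
      ∀ v : Int, d'.getD v 0 = d.getD v 0 + ((tiles.flatMap (fun p => [p.1, p.2])).count v : Int) := by
  intro tiles
  induction tiles with
  | nil => intro d _ _; exact ⟨d, rfl, by simp⟩
  | cons p rest ih =>
    obtain ⟨pa, pb⟩ := p
    intro d hall hc
    obtain ⟨hp, hrest⟩ := List.forall_mem_cons.mp hall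
    have h1 : (d.get? pa).isSome := by
      rw [← PySem.Dict.contains_eq_isSome_get?]; exact hc pa hp.1 hp.2.1
    obtain ⟨v1, hv1⟩ := Option.isSome_iff_exists.mp h1
    have h2 : ((d.insert pa (v1 + 1)).get? pb).isSome := by
      rw [← PySem.Dict.contains_eq_isSome_get?, PySem.Dict.contains_insert]
      rcases eq_or_ne pb pa with h | h
      · simp [h]
      · simp [hc pb hp.2.2.1 hp.2.2.2]
    obtain ⟨v2, hv2⟩ := Option.isSome_iff_exists.mp h2
    have hc' : ∀ v : Int, 0 ≤ v → v < 7 →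
        (((d.insert pa (v1 + 1)).insert pb (v2 + 1)).contains v) = true := by
      intro v a b
      simp [PySem.Dict.contains_insert, hc v a b]
    obtain ⟨d', hd', hg⟩ := ih ((d.insert pa (v1 + 1)).insert pb (v2 + 1)) hrest hc'
    refine ⟨d', ?_, ?_⟩
    · simp only [List.foldl_cons, Option.bind_some, hv1, Option.bind_some, hv2]
      exact hd'
    · intro v
      have e1 : d.getD pa 0 = v1 := PySem.Dict.getD_of_get?_eq_some d 0 hv1
      have e2 : (d.insert pa (v1 + 1)).getD pb 0 = v2 := PySem.Dict.getD_of_get?_eq_some _ 0 hv2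
      rw [PySem.Dict.getD_insert] at e2
      rw [hg v, PySem.Dict.getD_insert, PySem.Dict.getD_insert]
      simp only [List.flatMap_cons, List.count_append, List.count_cons, List.count_nil, beq_iff_eq]
      push_cast
      rcases eq_or_ne v pb with rfl | hvb <;> rcases eq_or_ne v pa with rfl | hva <;>
        simp_all <;> omega

lemma pvListCount :
    ∀ (vs : List Int) (cs : List Int), cs.length = 7 →
    (∀ v ∈ vs, 0 ≤ v ∧ v < 7) →
    ∃ cs', vs.foldl
        (fun oc v => oc.bind fun cs =>
          (PySem.List.pyGet? cs v).bind fun x => PySem.List.pySet? cs v (x + 1))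
        (some cs) = some cs'
      ∧ cs'.length = 7
      ∧ ∀ u : Int, 0 ≤ u → u < 7 →
          PySem.List.pyGetD cs' u 0 = PySem.List.pyGetD cs u 0 + (vs.count u : Int) := by
  intro vs
  induction vs with
  | nil => intro cs hlen _; exact ⟨cs, rfl, hlen, by simp⟩
  | cons v rest ih =>
    intro cs hlen hall
    obtain ⟨hv, hrest⟩ := List.forall_mem_cons.mp hall
    obtain ⟨n, rfl⟩ : ∃ n : Nat, v = (n : Int) := ⟨v.toNat, (Int.toNat_of_nonneg hv.1).symm⟩
    have hlt : n < cs.length := by omega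
    have hget : PySem.List.pyGet? cs (n : Int) = some (cs[n]'hlt) := by
      rw [PySem.List.pyGet?_natCast]
      exact List.getElem?_eq_getElem hlt
    have hset := PySem.List.pySet?_natCast cs n ((cs[n]'hlt) + 1) hlt
    obtain ⟨cs', hc', hlen', hg⟩ := ih (cs.set n ((cs[n]'hlt) + 1)) (by simp [hlen]) hrest
    refine ⟨cs', ?_, hlen', ?_⟩
    · simp only [List.foldl_cons, Option.bind_some, hget, Option.bind_some, hset]
      exact hc'
    · intro u hu0 hu7
      obtain ⟨m, rfl⟩ : ∃ m : Nat, u = (m : Int) := ⟨u.toNat, (Int.toNat_of_nonneg hu0).symm⟩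
      rw [hg _ hu0 hu7]
      rw [PySem.List.pyGetD_eq_getElem _ _ hu0 (by simp [hlen]; omega),
          PySem.List.pyGetD_eq_getElem _ _ hu0 (by omega)]
      simp only [Int.toNat_natCast]
      rw [List.getElem_set]
      simp only [List.count_cons, beq_iff_eq]
      by_cases hmn : n = m
      · subst hmn
        push_cast
        omega
      · have hne : ((n : Nat) : Int) ≠ ((m : Nat) : Int) := by exact_mod_cast hmn
        rw [if_neg hmn]
        simp [hne]

lemma pvReplicateGetD (u : Int) (h0 : 0 ≤ u) (h7 : u < 7) :
    PySem.List.pyGetD (List.replicate 7 (0 : Int)) u 0 = 0 := by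
  rw [PySem.List.pyGetD_eq_getElem _ _ h0 (by simp; omega)]
  exact List.getElem_replicate _

lemma pvInitContains : ∀ v : Int, 0 ≤ v → v < 7 →
    ((PySem.List.pyRange 0 7 1).foldl (fun d i => d.insert i (0 : Int)) PySem.Dict.empty).contains v = true := by
  intro v h1 h2
  interval_cases v <;> decide

lemma pvInitGetD (v : Int) :
    ((PySem.List.pyRange 0 7 1).foldl (fun d i => d.insert i (0 : Int)) PySem.Dict.empty).getD v 0 = 0 := by
  have h : PySem.List.pyRange 0 7 1 = [0, 1, 2, 3, 4, 5, 6] := by decide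
  rw [h]
  simp only [List.foldl_cons, List.foldl_nil, PySem.Dict.getD_insert, PySem.Dict.getD_empty]
  split_ifs <;> rfl


-- ===== VERDICT (by name: the statement is the Claim_ definition above) =====
theorem get_computer_move_spec : Claim_equal_get_computer_move := by
  intro cp ds _hdom hpre
  obtain ⟨hne, hrange⟩ := hpre
  unfold Spec_get_computer_move
  cases ds with
  | nil => exact absurd rfl hne
  | cons d0 dt =>
  -- the two snake ends
  have h0 : PySem.List.pyGet? (d0 :: dt) 0 = some d0 := by simp [pysem]
  have h1 : PySem.List.pyGet? (d0 :: dt) (-1) = some ((d0 :: dt).getLast (by simp)) := by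
    simp [pysem, List.getLast_eq_getElem]
    rfl
  -- count_numbers succeeds and agrees with the flat occurrence count
  obtain ⟨cA, hcA, hgA⟩ := pvCountFold (cp ++ d0 :: dt)
    ((PySem.List.pyRange 0 7 1).foldl (fun d i => d.insert i (0 : Int)) PySem.Dict.empty)
    hrange pvInitContains
  have hcnt : count_numbers cp (d0 :: dt) = some cA := hcA
  set lst := (d0 :: dt).getLast (by simp) with hlst
  set values := (cp ++ d0 :: dt).flatMap (fun p => [p.1, p.2]) with hvals
  have hvr : ∀ v ∈ values, 0 ≤ v ∧ v < 7 := by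
    intro v hv
    rw [hvals, List.mem_flatMap] at hv
    obtain ⟨p, hp, hv⟩ := hv
    have := hrange p hp
    simp only [List.mem_cons, List.not_mem_nil, or_false] at hv
    rcases hv with rfl | rfl <;> exact ⟨by omega, by omega⟩
  -- B's 7-slot counting loop succeeds and agrees with the flat occurrence count
  obtain ⟨cB, hcB, _hlenB, hgB⟩ := pvListCount values (List.replicate 7 (0 : Int)) (by simp) hvr
  -- the two score functions agree on the computer's pieces
  have hs : ∀ p ∈ cp, score_piece p cA = PySem.List.pyGetD cB p.1 0 + PySem.List.pyGetD cB p.2 0 := by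
    intro p hp
    have hr := hrange p (List.mem_append_left _ hp)
    simp only [score_piece, hgA, pvInitGetD]
    rw [hgB p.1 hr.1 hr.2.1, hgB p.2 hr.2.2.1 hr.2.2.2,
        pvReplicateGetD p.1 hr.1 hr.2.1, pvReplicateGetD p.2 hr.2.2.1 hr.2.2.2]
  rw [show get_computer_move cp (d0 :: dt) =
      (let left_end := d0.1
       let right_end := lst.2
       let possible_moves : List (Int × String × (Int × Int) × Int) :=
         (PySem.List.enumerate cp).foldl
           (fun acc ip =>
             let score := score_piece ip.2 cA
             let acc := if can_play ip.2 right_end then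
                 acc ++ [(ip.1 + 1, "right", orient_piece ip.2 right_end false, score)] else acc
             if can_play ip.2 left_end then
                 acc ++ [(-1 * (ip.1 + 1), "left", orient_piece ip.2 left_end true, score)] else acc)
           []
       if possible_moves.isEmpty then ((0 : Int), "draw", (none : Option (Int × Int)))
       else
         match PySem.List.sorted possible_moves (fun m => m.2.2.2) true with
         | [] => (0, "draw", none)
         | best :: _ => (best.1, best.2.1, some best.2.2.1)) from by
    unfold get_computer_move; rw [h0, h1, hcnt]]
  rw [show get_computer_move_alt cp (d0 :: dt) =
      (let best := (PySem.List.enumerate cp).foldl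
         (pvStepB d0.1 lst.2
           (fun p => PySem.List.pyGetD cB p.1 0 + PySem.List.pyGetD cB p.2 0)) none
       best.elim ((0 : Int), "draw", (none : Option (Int × Int))) fun b =>
         (b.2.1, b.2.2.1, some b.2.2.2)) from by
    unfold get_computer_move_alt
    rw [h0, h1]
    simp only [Option.elim]
    rw [hcB]
    rfl]
  simp only
  rw [pvLoopA d0.1 lst.2 cA (PySem.List.enumerate cp) [], List.nil_append]
  -- B's fold with the list-counter scores equals the same fold with A's dict scores
  have hcong : (PySem.List.enumerate cp).foldl
        (pvStepB d0.1 lst.2 (fun p => PySem.List.pyGetD cB p.1 0 + PySem.List.pyGetD cB p.2 0)) none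
      = (PySem.List.enumerate cp).foldl (pvStepB d0.1 lst.2 (fun p => score_piece p cA)) none := by
    apply PySem.List.foldl_congr_mem
    intro acc ip hip
    have hmem : ip.2 ∈ cp := by
      have := PySem.List.map_snd_enumerate cp 0
      rw [← this]
      exact List.mem_map_of_mem hip
    simp only [pvStepB, hs ip.2 hmem]
  rw [hcong]
  -- connect the two loops through the running first-maximum
  have hfold := pvFoldAgree d0.1 lst.2 (fun p => score_piece p cA) (PySem.List.enumerate cp) none
  simp only [Option.map_none] at hfold
  cases hb : (PySem.List.enumerate cp).foldl (pvStepB d0.1 lst.2 (fun p => score_piece p cA)) none with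
  | none =>
    rw [hb, Option.map_none] at hfold
    have hnil : (PySem.List.enumerate cp).flatMap (pvSubA d0.1 lst.2 (fun p => score_piece p cA)) = [] := by
      cases hms : (PySem.List.enumerate cp).flatMap (pvSubA d0.1 lst.2 (fun p => score_piece p cA)) with
      | nil => rfl
      | cons m t =>
        rw [hms, List.foldl_cons] at hfold
        have := pvFoldSome t m
        rw [show pvStep none m = some m from rfl] at hfold
        rw [hfold] at this
        simp at this
    rw [hnil]
    simp
  | some bb =>
    rw [hb, Option.map_some] at hfold
    have hne' : (PySem.List.enumerate cp).flatMap (pvSubA d0.1 lst.2 (fun p => score_piece p cA)) ≠ [] := by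
      intro hnil
      rw [hnil] at hfold
      simp at hfold
    rw [if_neg (by simpa using hne')]
    have hhead := pvSortedHead ((PySem.List.enumerate cp).flatMap (pvSubA d0.1 lst.2 (fun p => score_piece p cA)))
    rw [hfold] at hhead
    cases hsrt : PySem.List.sorted ((PySem.List.enumerate cp).flatMap
        (pvSubA d0.1 lst.2 (fun p => score_piece p cA))) (fun m => m.2.2.2) true with
    | nil => rw [hsrt] at hhead; simp at hhead
    | cons best rest =>
      rw [hsrt] at hhead
      simp only [List.head?_cons, Option.some.injEq] at hhead
      subst hhead
      rfl
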